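-- pv_equiv track=rewrite | github.com/fnever520/leetcode | number_of_substring.py | min_substring
-- ===== SOURCE A (Python) =====
-- def min_substring(string):
--     last_occurence = {char:index for index, char in enumerate(string)}
--
--     j = anchor = 0
--     ans = 0
--
--     for i, c in enumerate(string):
--         j = max(j, last_occurence[c])
--         if i == j:
--             ans += 1
--             anchor = i + 1
--
--     return ans
-- ===== SOURCE B (Python) =====
-- def min_substring(string):
--     # Multiset-of-remaining-characters scan: no indices, no running max.
--     rem = {}
--     for c in string:
--         rem[c] = rem.get(c, 0) + 1
--     seen = {}
--     open_chars = 0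
--     ans = 0
--     for c in string:
--         first_time = c not in seen
--         if first_time:
--             seen[c] = True
--         rem[c] -= 1
--         if first_time:
--             if rem[c] > 0:
--                 open_chars += 1
--         elif rem[c] == 0:
--             open_chars -= 1
--         if open_chars == 0:
--             ans += 1
--     return ans
-- ===== Notes on version B (the rewrite author's own statement) =====
-- stated objective: alternative
-- what changed: A builds a last-occurrence-index dict and counts positions where a running maximum of last indices equals the current index; B never compares indices at all: it builds a multiset of remaining character counts and scans once maintaining a counter of characters seen before but still remaining, closing a partition whenever that counter hits zero.
import Mathlib
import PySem

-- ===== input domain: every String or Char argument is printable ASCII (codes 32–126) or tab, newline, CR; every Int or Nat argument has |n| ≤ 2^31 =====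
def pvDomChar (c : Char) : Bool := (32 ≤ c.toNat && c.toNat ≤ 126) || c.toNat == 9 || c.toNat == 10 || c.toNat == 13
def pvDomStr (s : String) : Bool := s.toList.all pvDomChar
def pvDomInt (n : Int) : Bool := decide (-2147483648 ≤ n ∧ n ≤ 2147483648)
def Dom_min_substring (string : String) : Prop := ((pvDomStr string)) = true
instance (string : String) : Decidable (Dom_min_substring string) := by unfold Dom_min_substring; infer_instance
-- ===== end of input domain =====

-- B replaces A's last-occurrence-index dict and running index maximum by a multiset of
-- remaining character counts plus an "open characters" counter (alternative decomposition,
-- same O(n) cost; no indices are compared at all).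

-- ===== PORT A =====
-- last_occurence = {char:index for index, char in enumerate(string)}; the loop lookup
-- last_occurence[c] always succeeds (every scanned char is a key), ported as getD _ _ 0.
def min_substring (string : String) : Int :=
  let last := (PySem.List.enumerate string.toList 0).foldl
    (fun d (p : Int × Char) => PySem.Dict.insert d p.2 p.1) PySem.Dict.empty
  let st := (PySem.List.enumerate string.toList 0).foldl
    (fun (st : Int × Int × Int) (p : Int × Char) =>
      let j := max st.1 (PySem.Dict.getD last p.2 0)
      if p.1 = j then (j, p.1 + 1, st.2.2 + 1) else (j, st.2.1, st.2.2))
    (0, 0, 0)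
  st.2.2

-- ===== PORT B =====
-- rem[c] -= 1 (key always present) ported as insert with getD _ _ 0 - 1.
def min_substring_alt (string : String) : Int :=
  let rem0 := string.toList.foldl
    (fun d c => PySem.Dict.insert d c (PySem.Dict.getD d c 0 + 1)) PySem.Dict.empty
  let st := string.toList.foldl
    (fun (st : PySem.Dict Char Int × PySem.Dict Char Bool × Int × Int) c =>
      let firstTime := !(PySem.Dict.contains st.2.1 c)
      let seen := if firstTime then PySem.Dict.insert st.2.1 c true else st.2.1
      let rc := PySem.Dict.getD st.1 c 0 - 1
      let rem := PySem.Dict.insert st.1 c rc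
      let opens :=
        if firstTime then (if rc > 0 then st.2.2.1 + 1 else st.2.2.1)
        else (if rc = 0 then st.2.2.1 - 1 else st.2.2.1)
      let ans := if opens = 0 then st.2.2.2 + 1 else st.2.2.2
      (rem, seen, opens, ans))
    (rem0, PySem.Dict.empty, 0, 0)
  st.2.2.2

-- ===== PRECONDITION & SPEC =====
def Spec_min_substring (string : String) (out : Int) : Prop := out = min_substring_alt string
instance (string : String) (out : Int) : Decidable (Spec_min_substring string out) := by unfold Spec_min_substring; infer_instance

-- ===== CLAIM (what is proved, stated in full; the proofs are below) =====
def Claim_equal_min_substring : Prop := ∀ (string : String), Dom_min_substring string → Spec_min_substring string (min_substring string)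

-- ===== LEMMAS AND PROOFS =====

def pvLast (l : List Char) : PySem.Dict Char Int :=
  (PySem.List.enumerate l 0).foldl
    (fun d (p : Int × Char) => PySem.Dict.insert d p.2 p.1) PySem.Dict.empty

lemma pvLast_append (xs : List Char) (x : Char) :
    pvLast (xs ++ [x]) = PySem.Dict.insert (pvLast xs) x (xs.length : Int) := by
  unfold pvLast
  rw [PySem.List.enumerate_append, List.foldl_append]
  simp [PySem.List.enumerate_cons, PySem.List.enumerate_nil]

lemma pvLast_spec (l : List Char) (c : Char) (hc : c ∈ l) :
    ∃ v : Nat, PySem.Dict.getD (pvLast l) c 0 = (v : Int) ∧ l[v]? = some c ∧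
      ∀ k : Nat, l[k]? = some c → k ≤ v := by
  induction l using List.reverseRecOn with
  | nil => cases hc
  | append_singleton xs x ih =>
    rw [pvLast_append]
    by_cases hcx : c = x
    · subst hcx
      refine ⟨xs.length, ?_, ?_, ?_⟩
      · simp [PySem.Dict.getD_insert_self]
      · simp
      · intro k hk
        obtain ⟨h, -⟩ := List.getElem?_eq_some_iff.mp hk
        simp at h; omega
    · have hcxs : c ∈ xs := by
        rcases List.mem_append.mp hc with h | h
        · exact h
        · simp at h; exact absurd h hcx
      obtain ⟨v, hv, hocc, hub⟩ := ih hcxs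
      have hvlen : v < xs.length := (List.getElem?_eq_some_iff.mp hocc).1
      refine ⟨v, ?_, ?_, ?_⟩
      · simp [PySem.Dict.getD_insert, hcx]; exact hv
      · rw [List.getElem?_append_left hvlen]; exact hocc
      · intro k hk
        have hklen := (List.getElem?_eq_some_iff.mp hk).1
        simp at hklen
        rcases Nat.lt_or_ge k xs.length with h | h
        all_goals try replace h : k = xs.length := by omega
        · exact hub k (by rwa [List.getElem?_append_left h] at hk)
        · subst h
          rw [List.getElem?_append_right (le_refl _)] at hk
          simp at hk
          exact absurd hk.symm hcx

lemma pvMemDrop (l : List Char) (t : Nat) (d : Char) :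
    d ∈ l.drop t ↔ ∃ k : Nat, t ≤ k ∧ l[k]? = some d := by
  rw [List.mem_iff_getElem?]
  constructor
  · rintro ⟨i, hi⟩
    exact ⟨t + i, by omega, by rwa [List.getElem?_drop] at hi⟩
  · rintro ⟨k, hk, hocc⟩
    exact ⟨k - t, by rw [List.getElem?_drop]; rwa [show t + (k - t) = k by omega]⟩

lemma pvMemTake (l : List Char) (t : Nat) (d : Char) :
    d ∈ l.take t ↔ ∃ k : Nat, k < t ∧ l[k]? = some d := by
  rw [List.mem_iff_getElem?]
  constructor
  · rintro ⟨i, hi⟩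
    have hlt : i < t := by
      have := (List.getElem?_eq_some_iff.mp hi).1
      simp at this; omega
    exact ⟨i, hlt, by rw [List.getElem?_take, if_pos hlt] at hi; exact hi⟩
  · rintro ⟨k, hk, hocc⟩
    exact ⟨k, by rw [List.getElem?_take, if_pos hk]; exact hocc⟩

lemma pvLast_le_iff (l : List Char) (c : Char) (hc : c ∈ l) (m : Nat) :
    PySem.Dict.getD (pvLast l) c 0 ≤ (m : Int) ↔ c ∉ l.drop (m+1) := by
  obtain ⟨v, hv, hocc, hub⟩ := pvLast_spec l c hc
  rw [hv]
  constructor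
  · intro hle hmem
    obtain ⟨k, hk, hkocc⟩ := (pvMemDrop l (m+1) c).mp hmem
    have := hub k hkocc
    have : (k : Int) ≤ (v : Int) := by exact_mod_cast this
    omega
  · intro hnm
    by_contra hgt
    have hmv : m + 1 ≤ v := by omega
    exact hnm ((pvMemDrop l (m+1) c).mpr ⟨v, hmv, hocc⟩)

def pvBound (l : List Char) (m : Nat) : Bool :=
  (l.take (m+1)).all (fun c => !((l.drop (m+1)).contains c))

def pvNB (l : List Char) : Nat := (List.range l.length).countP (pvBound l)

lemma pvBound_iff (l : List Char) (m : Nat) :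
    pvBound l m = true ↔ ∀ d : Char, d ∈ l.take (m+1) → d ∉ l.drop (m+1) := by
  simp [pvBound]

lemma pvA_key (l p r : List Char) (c : Char) (hl : l = p ++ c :: r) (j : Int)
    (hub : ∀ k : Nat, k < p.length → ∀ d : Char, l[k]? = some d →
        PySem.Dict.getD (pvLast l) d 0 ≤ j)
    (hj2 : j = 0 ∨ ∃ k : Nat, k < p.length ∧ ∃ d : Char, l[k]? = some d ∧
        j = PySem.Dict.getD (pvLast l) d 0) :
    ((p.length : Int) = max j (PySem.Dict.getD (pvLast l) c 0) ↔
      pvBound l p.length = true) := by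
  have hi : l[p.length]? = some c := by
    rw [hl, List.getElem?_append_right (le_refl _)]
    simp
  have hc : c ∈ l := List.mem_iff_getElem?.mpr ⟨p.length, hi⟩
  constructor
  · intro hmax
    rw [pvBound_iff]
    intro d hd
    obtain ⟨k, hk, hocc⟩ := (pvMemTake l (p.length+1) d).mp hd
    have hdl : d ∈ l := List.mem_iff_getElem?.mpr ⟨k, hocc⟩
    have hle : PySem.Dict.getD (pvLast l) d 0 ≤ (p.length : Int) := by
      rcases Nat.lt_or_ge k p.length with h | h
      · have h1 := hub k h d hocc
        have h2 := le_max_left j (PySem.Dict.getD (pvLast l) c 0)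
        omega
      · have hkp : k = p.length := by omega
        subst hkp
        rw [hocc] at hi
        obtain rfl : d = c := Option.some.inj hi
        have h2 := le_max_right j (PySem.Dict.getD (pvLast l) d 0)
        omega
    exact (pvLast_le_iff l d hdl p.length).mp hle
  · intro hb
    rw [pvBound_iff] at hb
    have hctake : c ∈ l.take (p.length+1) :=
      (pvMemTake l (p.length+1) c).mpr ⟨p.length, by omega, hi⟩
    have hvle : PySem.Dict.getD (pvLast l) c 0 ≤ (p.length : Int) :=
      (pvLast_le_iff l c hc p.length).mpr (hb c hctake)
    have hvge : (p.length : Int) ≤ PySem.Dict.getD (pvLast l) c 0 := by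
      obtain ⟨v, hv, hocc, hub'⟩ := pvLast_spec l c hc
      have := hub' p.length hi
      rw [hv]; exact_mod_cast this
    have hjle : j ≤ (p.length : Int) := by
      rcases hj2 with rfl | ⟨k, hk, d, hocc, rfl⟩
      · positivity
      · have hdl : d ∈ l := List.mem_iff_getElem?.mpr ⟨k, hocc⟩
        have hdtake : d ∈ l.take (p.length+1) :=
          (pvMemTake l (p.length+1) d).mpr ⟨k, by omega, hocc⟩
        exact (pvLast_le_iff l d hdl p.length).mpr (hb d hdtake)
    have h1 := le_max_right j (PySem.Dict.getD (pvLast l) c 0)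
    have h2 : max j (PySem.Dict.getD (pvLast l) c 0) ≤ (p.length : Int) :=
      max_le hjle hvle
    omega

lemma pvA_loop (l : List Char) : ∀ (r p : List Char), l = p ++ r →
    ∀ (j anchor ans : Int),
    (∀ k : Nat, k < p.length → ∀ d : Char, l[k]? = some d →
        PySem.Dict.getD (pvLast l) d 0 ≤ j) →
    (j = 0 ∨ ∃ k : Nat, k < p.length ∧ ∃ d : Char, l[k]? = some d ∧
        j = PySem.Dict.getD (pvLast l) d 0) →
    ans = ((List.range p.length).countP (pvBound l) : Int) →
    ((PySem.List.enumerate r (p.length : Int)).foldl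
      (fun (st : Int × Int × Int) (q : Int × Char) =>
        let j := max st.1 (PySem.Dict.getD (pvLast l) q.2 0)
        if q.1 = j then (j, q.1 + 1, st.2.2 + 1) else (j, st.2.1, st.2.2))
      (j, anchor, ans)).2.2 = (pvNB l : Int) := by
  intro r
  induction r with
  | nil =>
    intro p hl j anchor ans hub hj2 hans
    obtain rfl : l = p := by simpa using hl
    simp [PySem.List.enumerate_nil, hans, pvNB]
  | cons c r' ih =>
    intro p hl j anchor ans hub hj2 hans
    rw [PySem.List.enumerate_cons, List.foldl_cons]
    have hi : l[p.length]? = some c := by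
      rw [hl, List.getElem?_append_right (le_refl _)]
      simp
    have hkey := pvA_key l p r' c hl j hub hj2
    have hl' : l = (p ++ [c]) ++ r' := by rw [hl]; simp
    have hlen : (((p ++ [c]).length : Nat) : Int) = (p.length : Int) + 1 := by
      simp
    have hub' : ∀ k : Nat, k < (p ++ [c]).length → ∀ d : Char, l[k]? = some d →
        PySem.Dict.getD (pvLast l) d 0 ≤ max j (PySem.Dict.getD (pvLast l) c 0) := by
      intro k hk d hocc
      simp at hk
      rcases Nat.lt_or_ge k p.length with h | h
      · have h1 := hub k h d hocc
        have h2 := le_max_left j (PySem.Dict.getD (pvLast l) c 0)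
        omega
      · have : k = p.length := by omega
        subst this
        rw [hocc] at hi
        obtain rfl : d = c := Option.some.inj hi
        exact le_max_right _ _
    have hj2' : max j (PySem.Dict.getD (pvLast l) c 0) = 0 ∨
        ∃ k : Nat, k < (p ++ [c]).length ∧ ∃ d : Char, l[k]? = some d ∧
          max j (PySem.Dict.getD (pvLast l) c 0) = PySem.Dict.getD (pvLast l) d 0 := by
      rcases max_choice j (PySem.Dict.getD (pvLast l) c 0) with h | h
      · rw [h]
        rcases hj2 with rfl | ⟨k, hk, d, hocc, rfl⟩
        · exact Or.inl rfl
        · exact Or.inr ⟨k, by simp; omega, d, hocc, rfl⟩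
      · rw [h]
        exact Or.inr ⟨p.length, by simp, c, hi, rfl⟩
    by_cases hcond : (p.length : Int) = max j (PySem.Dict.getD (pvLast l) c 0)
    · have hb : pvBound l p.length = true := hkey.mp hcond
      have hcnt : (List.range (p.length+1)).countP (pvBound l)
          = (List.range p.length).countP (pvBound l) + 1 := by
        rw [List.range_succ, List.countP_append]
        simp [hb]
      simp only [if_pos hcond]
      have := ih (p ++ [c]) hl' (max j (PySem.Dict.getD (pvLast l) c 0))
        ((p.length : Int) + 1) (ans + 1) hub' hj2'
        (by rw [hans, show (p ++ [c]).length = p.length + 1 by simp, hcnt]; push_cast; ring)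
      rw [hlen] at this
      exact this
    · have hb : pvBound l p.length ≠ true := fun h => hcond (hkey.mpr h)
      have hbf : pvBound l p.length = false := by
        cases hq : pvBound l p.length
        · rfl
        · exact absurd hq hb
      have hcnt : (List.range (p.length+1)).countP (pvBound l)
          = (List.range p.length).countP (pvBound l) := by
        rw [List.range_succ, List.countP_append]
        simp [hbf]
      simp only [if_neg hcond]
      have := ih (p ++ [c]) hl' (max j (PySem.Dict.getD (pvLast l) c 0))
        anchor ans hub' hj2' (by rw [hans, show (p ++ [c]).length = p.length + 1 by simp, hcnt])
      rw [hlen] at this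
      exact this

lemma pvA_eq (s : String) : min_substring s = (pvNB s.toList : Int) := by
  have h := pvA_loop s.toList s.toList [] rfl 0 0 0
    (by intro k hk; simp at hk) (Or.inl rfl) (by simp)
  simpa [min_substring, pvLast] using h

lemma pvTakeApp (p r' : List Char) (c : Char) :
    (p ++ c :: r').take (p.length + 1) = p ++ [c] := by
  rw [show p ++ c :: r' = (p ++ [c]) ++ r' by simp,
      show p.length + 1 = (p ++ [c]).length by simp]
  exact List.take_left

lemma pvDropApp (p r' : List Char) (c : Char) :
    (p ++ c :: r').drop (p.length + 1) = r' := by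
  rw [show p ++ c :: r' = (p ++ [c]) ++ r' by simp,
      show p.length + 1 = (p ++ [c]).length by simp]
  exact List.drop_left

lemma pvBound_append (p r' : List Char) (c : Char) :
    pvBound (p ++ c :: r') p.length = true ↔ ∀ d ∈ p ++ [c], d ∉ r' := by
  rw [pvBound_iff, pvTakeApp, pvDropApp]

lemma pvCardZero (p r' : List Char) (c : Char) :
    ((p ++ [c]).toFinset ∩ r'.toFinset).card = 0 ↔ ∀ d ∈ p ++ [c], d ∉ r' := by
  rw [Finset.card_eq_zero, Finset.eq_empty_iff_forall_notMem]
  constructor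
  · intro h d hd hdr
    exact h d (Finset.mem_inter.mpr ⟨List.mem_toFinset.mpr hd, List.mem_toFinset.mpr hdr⟩)
  · intro h d hd
    rw [Finset.mem_inter, List.mem_toFinset, List.mem_toFinset] at hd
    exact h d hd.1 hd.2

lemma pvB_loop (l : List Char) : ∀ (r p : List Char), l = p ++ r →
    ∀ (rem : PySem.Dict Char Int) (seen : PySem.Dict Char Bool) (opens ans : Int),
    (∀ c : Char, PySem.Dict.getD rem c 0 = (r.count c : Int)) →
    (∀ c : Char, PySem.Dict.contains seen c = decide (c ∈ p)) →
    opens = ((p.toFinset ∩ r.toFinset).card : Int) →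
    ans = ((List.range p.length).countP (pvBound l) : Int) →
    (r.foldl
      (fun (st : PySem.Dict Char Int × PySem.Dict Char Bool × Int × Int) c =>
        let firstTime := !(PySem.Dict.contains st.2.1 c)
        let seen := if firstTime then PySem.Dict.insert st.2.1 c true else st.2.1
        let rc := PySem.Dict.getD st.1 c 0 - 1
        let rem := PySem.Dict.insert st.1 c rc
        let opens :=
          if firstTime then (if rc > 0 then st.2.2.1 + 1 else st.2.2.1)
          else (if rc = 0 then st.2.2.1 - 1 else st.2.2.1)
        let ans := if opens = 0 then st.2.2.2 + 1 else st.2.2.2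
        (rem, seen, opens, ans))
      (rem, seen, opens, ans)).2.2.2 = (pvNB l : Int) := by
  intro r
  induction r with
  | nil =>
    intro p hl rem seen opens ans hrem hseen hopens hans
    obtain rfl : l = p := by simpa using hl
    simp [hans, pvNB]
  | cons c r' ih =>
    intro p hl rem seen opens ans hrem hseen hopens hans
    rw [List.foldl_cons]
    -- value of the decremented count
    have hrc : PySem.Dict.getD rem c 0 - 1 = ((r'.count c : Nat) : Int) := by
      rw [hrem c, List.count_cons_self]; push_cast; ring
    -- new rem invariant
    have hrem' : ∀ d : Char,
        PySem.Dict.getD (PySem.Dict.insert rem c (PySem.Dict.getD rem c 0 - 1)) d 0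
          = ((r'.count d : Nat) : Int) := by
      intro d
      rw [PySem.Dict.getD_insert]
      by_cases hdc : d = c
      · rw [if_pos hdc, hdc, hrc]
      · rw [if_neg hdc, hrem d]
        have hcd : ¬ c = d := fun h => hdc h.symm
        simp [hcd]
        
    have hl' : l = (p ++ [c]) ++ r' := by rw [hl]; simp
    have hPc : (p ++ [c]).toFinset = insert c p.toFinset := by
      ext d; simp
    have hRc : (c :: r').toFinset = insert c r'.toFinset := by simp
    -- count arithmetic for ans
    have hcntT : pvBound l p.length = true →
        ((List.range (p.length+1)).countP (pvBound l) : Int)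
          = ((List.range p.length).countP (pvBound l) : Int) + 1 := by
      intro hb
      rw [List.range_succ, List.countP_append]
      simp [hb]
    have hcntF : pvBound l p.length = false →
        ((List.range (p.length+1)).countP (pvBound l) : Int)
          = ((List.range p.length).countP (pvBound l) : Int) := by
      intro hb
      rw [List.range_succ, List.countP_append]
      simp [hb]
    -- boundary in terms of the new opens count
    have hbiff : pvBound l p.length = true ↔
        (((p ++ [c]).toFinset ∩ r'.toFinset).card : Int) = 0 := by
      rw [hl]  -- ⊢ pvBound (p ++ c :: r') p.length = true ↔ _
      rw [pvBound_append]
      rw [show ((((p ++ [c]).toFinset ∩ r'.toFinset).card : Int) = 0) ↔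
          (((p ++ [c]).toFinset ∩ r'.toFinset).card = 0) by exact_mod_cast Iff.rfl]
      exact (pvCardZero p r' c).symm
    by_cases hcp : c ∈ p
    · -- not a first occurrence
      have hft : (!(PySem.Dict.contains seen c)) = false := by
        rw [hseen c]; simp [hcp]
      have hseen' : ∀ d : Char, PySem.Dict.contains seen d = decide (d ∈ p ++ [c]) := by
        intro d
        rw [hseen d]
        by_cases hdc : d = c
        · subst hdc; simp [hcp]
        · simp [hdc]
      by_cases hcr : c ∈ r'
      · -- still open afterwards
        have hrcpos : ¬ (PySem.Dict.getD rem c 0 - 1 = 0) := by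
          rw [hrc]
          have := List.count_pos_iff.mpr hcr
          omega
        have hinter : p.toFinset ∩ (c :: r').toFinset = (p ++ [c]).toFinset ∩ r'.toFinset := by
          rw [hRc, hPc]
          ext d
          by_cases hdc : d = c
          · subst hdc; simp [hcp, hcr]
          · simp [hdc]
        have hopens' : opens = (((p ++ [c]).toFinset ∩ r'.toFinset).card : Int) := by
          rw [hopens, hinter]
        simp only [hft, Bool.false_eq_true, if_false, if_neg hrcpos]
        by_cases hz : opens = 0
        · have hb : pvBound l p.length = true := hbiff.mpr (by rw [← hopens']; exact hz)
          simp only [if_pos hz]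
          have := ih (p ++ [c]) hl'
            (PySem.Dict.insert rem c (PySem.Dict.getD rem c 0 - 1)) seen opens (ans + 1)
            hrem' hseen' hopens'
            (by rw [hans, show (p ++ [c]).length = p.length + 1 by simp, hcntT hb])
          exact this
        · have hb : pvBound l p.length = false := by
            cases hq : pvBound l p.length
            · rfl
            · exact absurd (by rw [hopens']; exact hbiff.mp hq) hz
          simp only [if_neg hz]
          exact ih (p ++ [c]) hl'
            (PySem.Dict.insert rem c (PySem.Dict.getD rem c 0 - 1)) seen opens ans
            hrem' hseen' hopens'
            (by rw [hans, show (p ++ [c]).length = p.length + 1 by simp, hcntF hb])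
      · -- last occurrence of c: it closes
        have hrczero : PySem.Dict.getD rem c 0 - 1 = 0 := by
          rw [hrc]
          have := List.count_eq_zero_of_not_mem hcr
          omega
        have hinter : p.toFinset ∩ (c :: r').toFinset
            = insert c ((p ++ [c]).toFinset ∩ r'.toFinset) := by
          rw [hRc, hPc]
          ext d
          by_cases hdc : d = c
          · subst hdc; simp [hcp, hcr]
          · simp [hdc]
        have hcnot : c ∉ (p ++ [c]).toFinset ∩ r'.toFinset := by
          simp [hcr]
        have hopens' : opens - 1 = (((p ++ [c]).toFinset ∩ r'.toFinset).card : Int) := by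
          rw [hopens, hinter, Finset.card_insert_of_notMem hcnot]
          push_cast; ring
        simp only [hft, Bool.false_eq_true, if_false, if_pos hrczero]
        by_cases hz : opens - 1 = 0
        · have hb : pvBound l p.length = true := hbiff.mpr (by rw [← hopens']; exact hz)
          simp only [if_pos hz]
          exact ih (p ++ [c]) hl'
            (PySem.Dict.insert rem c (PySem.Dict.getD rem c 0 - 1)) seen (opens - 1) (ans + 1)
            hrem' hseen' hopens'
            (by rw [hans, show (p ++ [c]).length = p.length + 1 by simp, hcntT hb])
        · have hb : pvBound l p.length = false := by
            cases hq : pvBound l p.length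
            · rfl
            · exact absurd (by rw [hopens']; exact hbiff.mp hq) hz
          simp only [if_neg hz]
          exact ih (p ++ [c]) hl'
            (PySem.Dict.insert rem c (PySem.Dict.getD rem c 0 - 1)) seen (opens - 1) ans
            hrem' hseen' hopens'
            (by rw [hans, show (p ++ [c]).length = p.length + 1 by simp, hcntF hb])
    · -- first occurrence of c
      have hft : (!(PySem.Dict.contains seen c)) = true := by
        rw [hseen c]; simp [hcp]
      have hseen' : ∀ d : Char,
          PySem.Dict.contains (PySem.Dict.insert seen c true) d = decide (d ∈ p ++ [c]) := by
        intro d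
        rw [PySem.Dict.contains_insert, hseen d]
        by_cases hdc : d = c
        · subst hdc; simp
        · simp [hdc]
      have hinterP : p.toFinset ∩ (c :: r').toFinset = p.toFinset ∩ r'.toFinset := by
        rw [hRc]
        ext d
        by_cases hdc : d = c
        · subst hdc; simp [hcp]
        · simp [hdc]
      by_cases hcr : c ∈ r'
      · -- c opens
        have hrcpos : PySem.Dict.getD rem c 0 - 1 > 0 := by
          rw [hrc]
          have := List.count_pos_iff.mpr hcr
          omega
        have hinter : (p ++ [c]).toFinset ∩ r'.toFinset
            = insert c (p.toFinset ∩ r'.toFinset) := by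
          rw [hPc]
          ext d
          by_cases hdc : d = c
          · subst hdc; simp [hcr]
          · simp [hdc]
        have hcnot : c ∉ p.toFinset ∩ r'.toFinset := by simp [hcp]
        have hopens' : opens + 1 = (((p ++ [c]).toFinset ∩ r'.toFinset).card : Int) := by
          rw [hopens, hinterP, hinter, Finset.card_insert_of_notMem hcnot]
          push_cast; ring
        simp only [hft, if_true, if_pos hrcpos]
        by_cases hz : opens + 1 = 0
        · have hb : pvBound l p.length = true := hbiff.mpr (by rw [← hopens']; exact hz)
          simp only [if_pos hz]
          exact ih (p ++ [c]) hl'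
            (PySem.Dict.insert rem c (PySem.Dict.getD rem c 0 - 1))
            (PySem.Dict.insert seen c true) (opens + 1) (ans + 1)
            hrem' hseen' hopens'
            (by rw [hans, show (p ++ [c]).length = p.length + 1 by simp, hcntT hb])
        · have hb : pvBound l p.length = false := by
            cases hq : pvBound l p.length
            · rfl
            · exact absurd (by rw [hopens']; exact hbiff.mp hq) hz
          simp only [if_neg hz]
          exact ih (p ++ [c]) hl'
            (PySem.Dict.insert rem c (PySem.Dict.getD rem c 0 - 1))
            (PySem.Dict.insert seen c true) (opens + 1) ans
            hrem' hseen' hopens'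
            (by rw [hans, show (p ++ [c]).length = p.length + 1 by simp, hcntF hb])
      · -- c opens and closes immediately
        have hrczero : ¬ (PySem.Dict.getD rem c 0 - 1 > 0) := by
          rw [hrc]
          have := List.count_eq_zero_of_not_mem hcr
          omega
        have hinter : (p ++ [c]).toFinset ∩ r'.toFinset = p.toFinset ∩ r'.toFinset := by
          rw [hPc]
          ext d
          by_cases hdc : d = c
          · subst hdc; simp [hcr]
          · simp [hdc]
        have hopens' : opens = (((p ++ [c]).toFinset ∩ r'.toFinset).card : Int) := by
          rw [hopens, hinterP, hinter]
        simp only [hft, if_true, if_neg hrczero]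
        by_cases hz : opens = 0
        · have hb : pvBound l p.length = true := hbiff.mpr (by rw [← hopens']; exact hz)
          simp only [if_pos hz]
          exact ih (p ++ [c]) hl'
            (PySem.Dict.insert rem c (PySem.Dict.getD rem c 0 - 1))
            (PySem.Dict.insert seen c true) opens (ans + 1)
            hrem' hseen' hopens'
            (by rw [hans, show (p ++ [c]).length = p.length + 1 by simp, hcntT hb])
        · have hb : pvBound l p.length = false := by
            cases hq : pvBound l p.length
            · rfl
            · exact absurd (by rw [hopens']; exact hbiff.mp hq) hz
          simp only [if_neg hz]
          exact ih (p ++ [c]) hl'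
            (PySem.Dict.insert rem c (PySem.Dict.getD rem c 0 - 1))
            (PySem.Dict.insert seen c true) opens ans
            hrem' hseen' hopens'
            (by rw [hans, show (p ++ [c]).length = p.length + 1 by simp, hcntF hb])

lemma pvB_eq (s : String) : min_substring_alt s = (pvNB s.toList : Int) := by
  have h := pvB_loop s.toList s.toList [] rfl
    (s.toList.foldl
      (fun d c => PySem.Dict.insert d c (PySem.Dict.getD d c 0 + 1)) PySem.Dict.empty)
    PySem.Dict.empty 0 0
    (by intro c
        rw [PySem.Dict.getD_foldl_insert_add_one]
        simp)
    (by intro c; simp)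
    (by simp)
    (by simp)
  simpa [min_substring_alt] using h

-- ===== VERDICT (by name: the statement is the Claim_ definition above) =====
theorem min_substring_spec : Claim_equal_min_substring := by
  intro s _
  unfold Spec_min_substring
  rw [pvA_eq, pvB_eq]
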